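-- pv_equiv track=rewrite | github.com/w-a-s-d-q-w-e-r/COMP2090SEF-Group-Project-on-Data-Structure-and-Algorithm | trie.py | _difference_in_word_length
-- ===== SOURCE A (Python) =====
-- def _difference_in_word_length(search_word, w):
--     if len(search_word) > len(w):
--         search_word, w = w, search_word
--     i = j = 0
--     mismatch = 0
--     while i < len(search_word) and j < len(w):
--         if search_word[i] == w[j]:
--             i, j = i+1, j+1
--         else:
--             mismatch = mismatch + 1
--             if mismatch > 1:
--                 return False
--             j= j + 1
--     return True
-- ===== SOURCE B (Python) =====
-- def _difference_in_word_length(search_word, w):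
--     s, t = (search_word, w) if len(search_word) <= len(w) else (w, search_word)
--     diffs = [i for i, (a, b) in enumerate(zip(s, t)) if a != b]
--     if not diffs:
--         return True
--     p = diffs[0]
--     n = min(len(s) - p, len(t) - p - 1)
--     return s[p:p+n] == t[p+1:p+1+n]
-- ===== Notes on version B (the rewrite author's own statement) =====
-- stated objective: alternative
-- what changed: Instead of A's stateful two-pointer scan with a mismatch counter, B materializes the full list of mismatch positions of the aligned zip in one comprehension (no early exit, no pointers), and then decides the answer with a single slice-equality comparison at the first mismatch position.
import Mathlib
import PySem

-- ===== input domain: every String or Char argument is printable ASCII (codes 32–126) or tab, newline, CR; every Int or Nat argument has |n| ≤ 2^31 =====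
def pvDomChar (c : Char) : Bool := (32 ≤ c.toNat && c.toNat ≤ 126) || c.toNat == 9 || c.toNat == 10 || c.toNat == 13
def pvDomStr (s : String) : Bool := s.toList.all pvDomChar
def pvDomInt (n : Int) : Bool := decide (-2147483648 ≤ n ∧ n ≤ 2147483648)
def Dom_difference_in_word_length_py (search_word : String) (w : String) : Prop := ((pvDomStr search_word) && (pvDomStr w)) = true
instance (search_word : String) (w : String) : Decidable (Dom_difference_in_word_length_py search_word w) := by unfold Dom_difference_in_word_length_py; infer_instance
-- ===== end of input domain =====

-- B replaces A's single mismatch-counting two-pointer loop by a data-driven plan: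
-- materialize ALL mismatch positions of the aligned zip in one comprehension (no early
-- exit), then decide with a single slice equality at the first one; objective: alternative.


-- ===== PORT A =====
-- A's while loop: two indices i j, a mismatch counter; on mismatch advance j only,
-- return False when mismatch exceeds 1; True when either index runs off its word.
def pyA_loop (s t : List Char) (i j mismatch : Nat) : Bool :=
  if _h : i < s.length ∧ j < t.length then
    if s[i]! == t[j]! then
      pyA_loop s t (i + 1) (j + 1) mismatch
    else
      if mismatch + 1 > 1 then false
      else pyA_loop s t i (j + 1) (mismatch + 1)
  else true
termination_by t.length - j

def difference_in_word_length_py (search_word : String) (w : String) : Bool :=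
  let sw := search_word.toList
  let ww := w.toList
  let st := if sw.length > ww.length then (ww, sw) else (sw, ww)
  pyA_loop st.1 st.2 0 0 0

-- ===== PORT B =====
-- diffs = [i for i, (a, b) in enumerate(zip(s, t)) if a != b]
def pyB_diffs (s t : List Char) : List Int :=
  (PySem.List.enumerate (s.zip t) 0).filterMap
    (fun q => if q.2.1 != q.2.2 then some q.1 else none)

-- the body of Source B after the swap: empty diffs → True, else one slice comparison.
-- (Python's min on two ints is Int.min; the slice bounds here are all nonnegative.)
def pyB_core (s t : List Char) : Bool :=
  match pyB_diffs s t with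
  | [] => true
  | p :: _ =>
      let n : Int := min ((s.length : Int) - p) ((t.length : Int) - p - 1)
      PySem.List.slice s (some p) (some (p + n)) == PySem.List.slice t (some (p + 1)) (some (p + 1 + n))

def difference_in_word_length_py_alt (search_word : String) (w : String) : Bool :=
  let sw := search_word.toList
  let ww := w.toList
  let st := if sw.length ≤ ww.length then (sw, ww) else (ww, sw)
  pyB_core st.1 st.2

-- ===== PRECONDITION & SPEC =====
def Spec_difference_in_word_length_py (search_word : String) (w : String) (out : Bool) : Prop := out = difference_in_word_length_py_alt search_word w
instance (search_word : String) (w : String) (out : Bool) : Decidable (Spec_difference_in_word_length_py search_word w out) := by unfold Spec_difference_in_word_length_py; infer_instance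

-- ===== CLAIM (what is proved, stated in full; the proofs are below) =====
def Claim_equal_difference_in_word_length_py : Prop := ∀ (search_word : String) (w : String), Dom_difference_in_word_length_py search_word w → Spec_difference_in_word_length_py search_word w (difference_in_word_length_py search_word w)

-- ===== LEMMAS AND PROOFS =====

-- equality of the two words on the overlap after the single allowed skip
def ovEq : List Char → List Char → Bool
  | [], _ => true
  | _ :: _, [] => true
  | a :: u, b :: v => a == b && ovEq u v

-- mid-level reference function: common prefix, then ovEq offset by one
def refF : List Char → List Char → Bool
  | [], _ => true
  | _ :: _, [] => true
  | a :: u, b :: v => if a == b then refF u v else ovEq (a :: u) v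

theorem ovEq_eq_take (u v : List Char) :
    ovEq u v = (u.take (min u.length v.length) == v.take (min u.length v.length)) := by
  induction u generalizing v with
  | nil => cases v <;> simp [ovEq]
  | cons a u ih =>
    cases v with
    | nil => simp [ovEq]
    | cons b v =>
      have hmin : min (u.length + 1) (v.length + 1) = min u.length v.length + 1 := by omega
      by_cases hab : a = b
      · subst hab
        simp only [ovEq, List.length_cons, hmin, List.take_succ_cons]
        simp [ih]
      · simp only [ovEq, List.length_cons, hmin, List.take_succ_cons]
        simp only [List.cons_beq_cons]
        rw [ih]

-- A's loop after the single mismatch (counter = 1) is ovEq of the remaining drops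
theorem loopA_one (s t : List Char) (i j : Nat) :
    pyA_loop s t i j 1 = ovEq (s.drop i) (t.drop j) := by
  generalize hn : s.length - i = n
  induction n generalizing i j with
  | zero =>
    rw [pyA_loop]
    have hs : ¬ i < s.length := by omega
    have : s.drop i = [] := by simp [List.drop_eq_nil_iff]; omega
    simp [hs, this, ovEq]
  | succ n ih =>
    rw [pyA_loop]
    by_cases hc : i < s.length ∧ j < t.length
    · rw [dif_pos hc]
      have hds : s.drop i = s[i] :: s.drop (i + 1) := List.drop_eq_getElem_cons hc.1
      have hdt : t.drop j = t[j] :: t.drop (j + 1) := List.drop_eq_getElem_cons hc.2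
      have hsi : s[i]! = s[i] := getElem!_pos s i hc.1
      have htj : t[j]! = t[j] := getElem!_pos t j hc.2
      by_cases he : (s[i]! == t[j]!) = true
      · rw [if_pos he, ih (i+1) (j+1) (by omega), hds, hdt]
        simp [ovEq, hsi, htj] at he ⊢
        simp [he]
      · rw [if_neg he, if_pos (by omega), hds, hdt]
        simp [ovEq, hsi, htj] at he ⊢
        exact fun h => absurd h he
    · rw [dif_neg hc]
      rcases Decidable.not_and_iff_not_or_not.mp hc with h | h
      · have : s.drop i = [] := by simp [List.drop_eq_nil_iff]; omega
        simp [this, ovEq]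
      · have : t.drop j = [] := by simp [List.drop_eq_nil_iff]; omega
        cases hd : s.drop i <;> simp [this, ovEq]

-- A's loop before any mismatch is refF of the remaining drops (shorter word first)
theorem loopA_zero (s t : List Char) (hst : s.length ≤ t.length) (i : Nat) (hi : i ≤ s.length) :
    pyA_loop s t i i 0 = refF (s.drop i) (t.drop i) := by
  generalize hn : s.length - i = n
  induction n generalizing i with
  | zero =>
    rw [pyA_loop]
    have hs : ¬ i < s.length := by omega
    have : s.drop i = [] := by simp [List.drop_eq_nil_iff]; omega
    simp [hs, this, refF]
  | succ n ih =>
    have hps : i < s.length := by omega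
    have hpt : i < t.length := by omega
    rw [pyA_loop, dif_pos ⟨hps, hpt⟩]
    have hds : s.drop i = s[i] :: s.drop (i + 1) := List.drop_eq_getElem_cons hps
    have hdt : t.drop i = t[i] :: t.drop (i + 1) := List.drop_eq_getElem_cons hpt
    have hsi : s[i]! = s[i] := getElem!_pos s i hps
    have hti : t[i]! = t[i] := getElem!_pos t i hpt
    by_cases he : (s[i]! == t[i]!) = true
    · rw [if_pos he, ih (i + 1) (by omega) (by omega), hds, hdt]
      simp [refF, hsi, hti] at he ⊢
      simp [he]
    · rw [if_neg he, if_neg (by omega : ¬ (0 + 1 > 1))]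
      rw [show (0 : Nat) + 1 = 1 from rfl, loopA_one s t i (i + 1), hds, hdt]
      simp [hsi, hti] at he
      simp [refF, he]

-- shift lemma for enumerate's start index
theorem enum_shift (z : List (Char × Char)) (k : Int) :
    PySem.List.enumerate z (k + 1) = (PySem.List.enumerate z k).map (fun p => (p.1 + 1, p.2)) := by
  induction z generalizing k with
  | nil => simp [PySem.List.enumerate_nil]
  | cons x xs ih => rw [PySem.List.enumerate_cons, PySem.List.enumerate_cons, List.map_cons, ih]

theorem diffs_cons (a b : Char) (s t : List Char) :
    pyB_diffs (a :: s) (b :: t) =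
      (if a == b then ([] : List Int) else [0]) ++ (pyB_diffs s t).map (· + 1) := by
  unfold pyB_diffs
  rw [List.zip_cons_cons, PySem.List.enumerate_cons, List.filterMap_cons]
  rw [show (0 : Int) + 1 = 0 + 1 by ring, enum_shift, List.filterMap_map]
  by_cases h : a = b
  · simp [h, List.map_filterMap]
    congr 1
    funext q
    by_cases hq : q.2.1 = q.2.2 <;> simp [hq]
  · have hne : (a != b) = true := bne_iff_ne.mpr h
    simp only [hne, if_pos, List.map_filterMap]
    simp [h]
    congr 1
    funext q
    by_cases hq : q.2.1 = q.2.2 <;> simp [hq]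

-- every recorded mismatch position is a Nat below both lengths
theorem diffs_mem_bound (s t : List Char) (p : Int) (hp : p ∈ pyB_diffs s t) :
    ∃ k : Nat, p = (k : Int) ∧ k < s.length ∧ k < t.length := by
  unfold pyB_diffs at hp
  rw [List.mem_filterMap] at hp
  obtain ⟨q, hq, hf⟩ := hp
  rw [PySem.List.mem_enumerate_iff] at hq
  obtain ⟨k, hk, rfl⟩ := hq
  refine ⟨k, ?_, ?_, ?_⟩
  · split at hf
    · simpa using (Option.some.inj hf).symm
    · exact absurd hf (by simp)
  · simp [List.length_zip] at hk; omega
  · simp [List.length_zip] at hk; omega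

-- shifting a slice with nonnegative bounds across a cons cell
theorem slice_shift (x : Char) (xs : List Char) (j : Int) (n : Nat) (hj : 0 ≤ j) :
    PySem.List.slice (x :: xs) (some (j + 1)) (some (j + 1 + (n : Int)))
      = PySem.List.slice xs (some j) (some (j + (n : Int))) := by
  obtain ⟨jn, rfl⟩ := Int.eq_ofNat_of_zero_le hj
  have h1 : ((jn : Int) + 1) = ((jn + 1 : Nat) : Int) := by push_cast; ring
  have h2 : ((jn : Int) + 1 + (n : Int)) = (((jn + 1 : Nat)) : Int) + ((n : Nat) : Int) := by push_cast; ring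
  rw [h2, h1, PySem.List.slice_natCast_add, PySem.List.slice_natCast_add, List.drop_succ_cons]

-- B's core equals the reference function on (shorter, longer)
theorem coreB_eq_refF (s t : List Char) (hst : s.length ≤ t.length) :
    pyB_core s t = refF s t := by
  induction s generalizing t with
  | nil =>
    unfold pyB_core pyB_diffs
    simp [PySem.List.enumerate_nil, refF]
  | cons a s ih =>
    cases t with
    | nil => simp at hst
    | cons b t =>
      have hst' : s.length ≤ t.length := by simp at hst; omega
      by_cases h : a = b
      · -- heads equal: diffs shift by one; B on cons reduces to B on tails
        have hd := diffs_cons a b s t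
        rw [if_pos (beq_iff_eq.mpr h)] at hd
        simp only [List.nil_append] at hd
        unfold pyB_core
        rw [hd]
        cases hds : pyB_diffs s t with
        | nil => simp [refF, h, ← ih t hst']; unfold pyB_core; rw [hds]
        | cons p rest =>
          obtain ⟨k, rfl, hks, hkt⟩ := diffs_mem_bound s t p (hds ▸ List.mem_cons_self ..)
          simp only [List.map_cons]
          have hn : min (((a :: s).length : Int) - ((k : Int) + 1)) (((b :: t).length : Int) - ((k : Int) + 1) - 1)
              = ((min (s.length - k) (t.length - k - 1) : Nat) : Int) := by
            simp only [List.length_cons]; push_cast; omega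
          have hn' : min ((s.length : Int) - (k : Int)) ((t.length : Int) - (k : Int) - 1)
              = ((min (s.length - k) (t.length - k - 1) : Nat) : Int) := by
            push_cast; omega
          set m : Nat := min (s.length - k) (t.length - k - 1) with hm
          simp only [hn]
          rw [slice_shift a s (k : Int) m (by positivity),
              slice_shift b t ((k : Int) + 1) m (by positivity)]
          have hrf : refF (a :: s) (b :: t) = refF s t := by simp [refF, h]
          rw [hrf, ← ih t hst']
          unfold pyB_core
          rw [hds]
          simp only [hn']
      · -- heads differ: first mismatch at 0, one slice comparison = ovEq with offset one
        have hd := diffs_cons a b s t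
        rw [if_neg (by simpa using h)] at hd
        unfold pyB_core
        rw [hd]
        simp only [List.cons_append]
        have hn : min (((a :: s).length : Int) - 0) (((b :: t).length : Int) - 0 - 1)
            = ((min (s.length + 1) t.length : Nat) : Int) := by
          simp only [List.length_cons]; push_cast; omega
        simp only [hn]
        set m : Nat := min (s.length + 1) t.length with hm
        rw [show ((0 : Int) + 1) = (0 : Int) + 1 from rfl]
        rw [slice_shift b t 0 m le_rfl]
        have h0 : ((0 : Int)) = ((0 : Nat) : Int) := by norm_num
        rw [h0, PySem.List.slice_natCast_add, PySem.List.slice_natCast_add]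
        have hrf : refF (a :: s) (b :: t) = ovEq (a :: s) t := by simp [refF, h]
        rw [hrf, ovEq_eq_take]
        have hmm : min (a :: s).length t.length = m := by
          simp only [List.length_cons, hm]
        rw [hmm]
        simp

theorem ab_eq (search_word w : String) :
    difference_in_word_length_py search_word w = difference_in_word_length_py_alt search_word w := by
  unfold difference_in_word_length_py difference_in_word_length_py_alt
  by_cases h : search_word.toList.length ≤ w.toList.length
  · have h' : ¬ search_word.toList.length > w.toList.length := by omega
    simp only [h, h', if_pos, if_neg, not_false_iff]
    rw [coreB_eq_refF _ _ h]
    simpa using loopA_zero _ _ h 0 (Nat.zero_le _)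
  · have h' : search_word.toList.length > w.toList.length := by omega
    simp only [h, h', if_pos, if_neg, not_false_iff]
    rw [coreB_eq_refF _ _ (by omega)]
    simpa using loopA_zero _ _ (by omega : w.toList.length ≤ search_word.toList.length) 0 (Nat.zero_le _)

-- ===== VERDICT (by name: the statement is the Claim_ definition above) =====
theorem difference_in_word_length_py_spec : Claim_equal_difference_in_word_length_py := by
  intro sw w _
  unfold Spec_difference_in_word_length_py
  exact ab_eq sw w
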